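-- pv_equiv track=rewrite | github.com/ashwinkumaar/DSA5207_spring-2025 | Assignment-3/code/submission.py | calc_known
-- ===== SOURCE A (Python) =====
-- from collections import Counter, defaultdict
--
-- def calc_known(train_data, rare_word_max_freq):
--     known_words = set()
--     word_c = defaultdict(int)
--
--     for word, _ in train_data:
--         word_c[word] += 1
--
--     for word, count in word_c.items():
--         if count > rare_word_max_freq:
--             known_words.add(word)
--     return known_words
-- ===== SOURCE B (Python) =====
-- def calc_known(train_data, rare_word_max_freq):
--     # Recursive partition: take the first remaining word, strip all its
--     # occurrences (its count is the length drop), recurse on the remainder.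
--     def go(words):
--         if not words:
--             return []
--         w = words[0]
--         rest = [x for x in words[1:] if x != w]
--         cnt = len(words) - len(rest)
--         head = [w] if cnt > rare_word_max_freq else []
--         return head + go(rest)
--     return set(go([word for word, _ in train_data]))
-- ===== Notes on version B (the rewrite author's own statement) =====
-- stated objective: alternative
-- what changed: B replaces A's count-table-then-scan with a recursive partition that uses no counting structure at all: repeatedly take the first remaining word, strip every occurrence of it from the list (its count is the length drop), emit it if that count exceeds the threshold, and recurse on the shrunken remainder.
import Mathlib
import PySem

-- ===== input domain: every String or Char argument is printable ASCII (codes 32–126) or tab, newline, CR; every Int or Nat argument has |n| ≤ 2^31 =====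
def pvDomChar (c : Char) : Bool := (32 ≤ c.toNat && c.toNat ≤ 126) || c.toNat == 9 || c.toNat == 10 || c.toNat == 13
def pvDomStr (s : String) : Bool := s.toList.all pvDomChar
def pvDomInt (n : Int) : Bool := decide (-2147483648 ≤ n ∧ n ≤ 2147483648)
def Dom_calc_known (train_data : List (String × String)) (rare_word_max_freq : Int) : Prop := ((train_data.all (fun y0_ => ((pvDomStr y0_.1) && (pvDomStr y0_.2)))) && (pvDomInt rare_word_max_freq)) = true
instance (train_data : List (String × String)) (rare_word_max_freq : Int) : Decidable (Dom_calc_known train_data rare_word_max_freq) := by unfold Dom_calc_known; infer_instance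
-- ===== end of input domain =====

-- B replaces A's count-table-then-scan with a recursive partition that keeps no counts:
-- take the first remaining word, strip its occurrences (count = length drop), recurse (alternative; not faster).

-- ===== PORT A =====
-- for word, _ in train_data: word_c[word] += 1  (defaultdict(int));
-- then for word, count in word_c.items(): if count > rare_word_max_freq: known_words.add(word)
def calc_known (train_data : List (String × String)) (rare_word_max_freq : Int) : List String :=
  let word_c : PySem.Dict String Int :=
    train_data.foldl (fun d p => d.modify p.1 0 (fun c => c + 1)) PySem.Dict.empty
  word_c.items.foldl
    (fun known_words kv =>
      if kv.2 > rare_word_max_freq then PySem.Set.add known_words kv.1 else known_words)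
    PySem.Set.empty

-- ===== PORT B =====
-- def go(words): if not words: return []
--   w = words[0]; rest = [x for x in words[1:] if x != w]; cnt = len(words) - len(rest)
--   head = [w] if cnt > rare_word_max_freq else []; return head + go(rest)
def goB (t : Int) : List String → List String
  | [] => []
  | w :: ws =>
    let rest := ws.filter (fun x => decide (¬ x = w))
    let cnt : Int := (1 + ws.length : Int) - rest.length
    let head := if cnt > t then [w] else []
    head ++ goB t rest
termination_by xs => xs.length
decreasing_by simp; exact (List.length_filter_le _ _).trans (List.length_attach).le

-- return set(go([word for word, _ in train_data]))
def calc_known_alt (train_data : List (String × String)) (rare_word_max_freq : Int) : List String :=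
  PySem.Set.ofList (goB rare_word_max_freq (train_data.map Prod.fst))

-- ===== PRECONDITION & SPEC =====
def Spec_calc_known (train_data : List (String × String)) (rare_word_max_freq : Int) (out : List String) : Prop := out = calc_known_alt train_data rare_word_max_freq
instance (train_data : List (String × String)) (rare_word_max_freq : Int) (out : List String) : Decidable (Spec_calc_known train_data rare_word_max_freq out) := by unfold Spec_calc_known; infer_instance

-- ===== CLAIM (what is proved, stated in full; the proofs are below) =====
def Claim_equal_calc_known : Prop := ∀ (train_data : List (String × String)) (rare_word_max_freq : Int), Dom_calc_known train_data rare_word_max_freq → Spec_calc_known train_data rare_word_max_freq (calc_known train_data rare_word_max_freq)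

-- ===== LEMMAS AND PROOFS =====

-- first-occurrence subsequence of xs among elements not yet in `seen`
def firstOcc {α : Type} [BEq α] : List α → List α → List α
  | [], _ => []
  | x :: xs, seen => if seen.contains x then firstOcc xs seen else x :: firstOcc xs (x :: seen)

theorem firstOcc_congr {α : Type} [BEq α] [LawfulBEq α] (xs : List α) (s t : List α)
    (h : ∀ y ∈ xs, (y ∈ s ↔ y ∈ t)) : firstOcc xs s = firstOcc xs t := by
  induction xs generalizing s t with
  | nil => rfl
  | cons x xs ih =>
    have hx : (s.contains x) = (t.contains x) := by
      have := h x (List.mem_cons_self ..)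
      simp [this]
    simp only [firstOcc, hx]
    split
    · exact ih s t (fun y hy => h y (List.mem_cons_of_mem _ hy))
    · have := ih (x :: s) (x :: t) (fun y hy => by
        simp [List.mem_cons, h y (List.mem_cons_of_mem _ hy)])
      simp [this]

theorem foldl_add_eq_firstOcc {α : Type} [BEq α] [LawfulBEq α] (xs : List α) (acc : List α) :
    xs.foldl PySem.Set.add acc = acc ++ firstOcc xs acc := by
  induction xs generalizing acc with
  | nil => simp [firstOcc]
  | cons x xs ih =>
    by_cases hx : x ∈ acc
    · have h1 : PySem.Set.add acc x = acc := by
        simp [PySem.Set.add, PySem.Set.contains, hx]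
      have h2 : firstOcc (x :: xs) acc = firstOcc xs acc := by
        simp [firstOcc, hx]
      rw [List.foldl_cons, h1, h2, ih]
    · have h1 : PySem.Set.add acc x = acc ++ [x] := by
        simp [PySem.Set.add, PySem.Set.contains, hx]
      have h2 : firstOcc (x :: xs) acc = x :: firstOcc xs (x :: acc) := by
        simp [firstOcc, hx]
      rw [List.foldl_cons, h1, h2, ih]
      have h3 : firstOcc xs (acc ++ [x]) = firstOcc xs (x :: acc) := by
        apply firstOcc_congr
        intro y _
        simp [List.mem_append, List.mem_cons, or_comm]
      simp [h3]

theorem ofList_eq_firstOcc {α : Type} [BEq α] [LawfulBEq α] (xs : List α) :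
    PySem.Set.ofList xs = firstOcc xs [] := by
  have := foldl_add_eq_firstOcc xs ([] : List α)
  simpa [PySem.Set.ofList, PySem.Set.empty] using this

theorem mem_firstOcc_not_mem_seen {α : Type} [BEq α] [LawfulBEq α] (xs seen : List α)
    (y : α) (hy : y ∈ firstOcc xs seen) : y ∉ seen := by
  induction xs generalizing seen with
  | nil => simp [firstOcc] at hy
  | cons x xs ih =>
    simp only [firstOcc] at hy
    split at hy
    · exact ih seen hy
    · rcases List.mem_cons.mp hy with rfl | hy'
      · rename_i hx
        simp only [List.contains_iff_mem] at hx
        simpa using hx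
      · have := ih (x :: seen) hy'
        exact fun hs => this (List.mem_cons_of_mem _ hs)

theorem mem_firstOcc_mem {α : Type} [BEq α] (xs seen : List α)
    (y : α) (hy : y ∈ firstOcc xs seen) : y ∈ xs := by
  induction xs generalizing seen with
  | nil => simpa [firstOcc] using hy
  | cons x xs ih =>
    simp only [firstOcc] at hy
    split at hy
    · exact List.mem_cons_of_mem _ (ih seen hy)
    · rcases List.mem_cons.mp hy with rfl | hy'
      · exact List.mem_cons_self ..
      · exact List.mem_cons_of_mem _ (ih (x :: seen) hy')

theorem firstOcc_cons_seen {α : Type} [BEq α] [LawfulBEq α] (xs : List α) (x : α)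
    (seen : List α) :
    firstOcc xs (x :: seen) = (firstOcc xs seen).filter (fun y => !(y == x)) := by
  induction xs generalizing seen with
  | nil => rfl
  | cons y ys ih =>
    by_cases hyx : y = x
    · subst hyx
      by_cases hx : y ∈ seen
      · simp [firstOcc, hx, ih]
      · simp only [firstOcc, List.contains_iff_mem, List.mem_cons, true_or,
          if_pos, hx, Bool.false_eq_true, if_false, List.filter_cons, BEq.rfl,
          Bool.not_true]
        apply (List.filter_eq_self.mpr ?_).symm
        intro a ha
        have hnm := mem_firstOcc_not_mem_seen ys (y :: seen) a ha
        have : a ≠ y := fun h => hnm (h ▸ List.mem_cons_self ..)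
        simpa using this
    · by_cases hy : y ∈ seen
      · have h1 : y ∈ x :: seen := List.mem_cons_of_mem _ hy
        simp [firstOcc, hy, h1, ih]
      · have h1 : y ∉ x :: seen := by simp [List.mem_cons, hyx, hy]
        have hswap : firstOcc ys (y :: x :: seen) = firstOcc ys (x :: y :: seen) := by
          apply firstOcc_congr
          intro z _
          constructor <;> (intro h; simp only [List.mem_cons] at h ⊢; tauto)
        have hne : (y == x) = false := by simpa using hyx
        simp only [firstOcc, List.contains_iff_mem, hy, h1,
          if_false, List.filter_cons, hne, Bool.not_false, if_pos, hswap, ih (y :: seen)]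

theorem firstOcc_filter {α : Type} [BEq α] [LawfulBEq α] (p : α → Bool) (xs : List α)
    (seen : List α) :
    firstOcc (xs.filter p) seen = (firstOcc xs seen).filter p := by
  induction xs generalizing seen with
  | nil => rfl
  | cons x xs ih =>
    by_cases hp : p x
    · by_cases hx : x ∈ seen
      · simp [hp, firstOcc, hx, ih]
      · simp [hp, firstOcc, hx, ih]
    · by_cases hx : x ∈ seen
      · simp [hp, firstOcc, hx, ih]
      · simp only [List.filter_cons, hp, Bool.false_eq_true, if_false, firstOcc,
          List.contains_iff_mem, hx]
        rw [ih seen, firstOcc_cons_seen, List.filter_filter]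
        apply List.filter_congr
        intro a _
        by_cases hax : a = x
        · subst hax; simp [hp]
        · simp [hax]

theorem firstOcc_eq_self {α : Type} [BEq α] [LawfulBEq α] (xs seen : List α)
    (hnd : xs.Nodup) (hdisj : ∀ y ∈ xs, y ∉ seen) : firstOcc xs seen = xs := by
  induction xs generalizing seen with
  | nil => rfl
  | cons x xs ih =>
    have hx : x ∉ seen := hdisj x (List.mem_cons_self ..)
    have hxs : x ∉ xs := (List.nodup_cons.mp hnd).1
    simp only [firstOcc, List.contains_iff_mem, hx, if_neg, Bool.false_eq_true, if_false]
    rw [ih (x :: seen) (List.nodup_cons.mp hnd).2 ?_]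
    intro y hy
    have h1 := hdisj y (List.mem_cons_of_mem _ hy)
    have h2 : y ≠ x := fun h => hxs (h ▸ hy)
    simp [List.mem_cons, h1, h2]

theorem ofList_of_nodup {α : Type} [BEq α] [LawfulBEq α] (xs : List α) (h : xs.Nodup) :
    PySem.Set.ofList xs = xs := by
  rw [ofList_eq_firstOcc, firstOcc_eq_self xs [] h (by simp)]

theorem foldl_addIf_eq_filter {α : Type} [BEq α] [LawfulBEq α] (p : α → Prop) [DecidablePred p]
    (ks : List α) (acc : List α) (hnd : ks.Nodup) (hdisj : ∀ k ∈ ks, k ∉ acc) :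
    ks.foldl (fun s k => if p k then PySem.Set.add s k else s) acc
      = acc ++ ks.filter (fun k => decide (p k)) := by
  induction ks generalizing acc with
  | nil => simp
  | cons k ks ih =>
    have hknd : k ∉ ks := (List.nodup_cons.mp hnd).1
    have hka : k ∉ acc := hdisj k (List.mem_cons_self ..)
    simp only [List.foldl_cons, List.filter_cons]
    by_cases hp : p k
    · have hadd : PySem.Set.add acc k = acc ++ [k] := by
        simp [PySem.Set.add, PySem.Set.contains, hka]
      rw [if_pos hp, hadd, ih (acc ++ [k]) (List.nodup_cons.mp hnd).2]
      · simp [hp]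
      · intro k' hk'
        have h1 := hdisj k' (List.mem_cons_of_mem _ hk')
        have h2 : k' ≠ k := fun h => hknd (h ▸ hk')
        simp [List.mem_append, h1, h2]
    · rw [if_neg hp, ih acc (List.nodup_cons.mp hnd).2
        (fun k' hk' => hdisj k' (List.mem_cons_of_mem _ hk'))]
      simp [hp]

theorem calc_known_eq_filter (train_data : List (String × String)) (t : Int) :
    calc_known train_data t
      = (PySem.Set.ofList (train_data.map Prod.fst)).filter
          (fun k => decide ((List.count k (train_data.map Prod.fst) : Int) > t)) := by
  unfold calc_known
  have hctr : train_data.foldl (fun d p => d.modify p.1 0 (fun c => c + 1)) PySem.Dict.empty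
      = PySem.Dict.counter (train_data.map Prod.fst) := by
    rw [PySem.Dict.counter_eq_foldl, List.foldl_map]
  rw [hctr]
  dsimp only
  rw [PySem.Dict.items_counter, List.foldl_map]
  have := foldl_addIf_eq_filter (fun k => (List.count k (train_data.map Prod.fst) : Int) > t)
    (PySem.Set.ofList (train_data.map Prod.fst)) []
    (PySem.Set.nodup_ofList _) (by simp)
  simpa [PySem.Set.empty] using this

theorem filter_subtype_unattach {α : Type} {P : α → Prop} (p : α → Bool) (l : List (Subtype P)) :
    (l.filter (fun x => p x.1)).unattach = l.unattach.filter p := by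
  induction l with
  | nil => rfl
  | cons x xs ih => by_cases h : p x.1 <;> simp [h, ih]


theorem goB_eq (t : Int) (xs : List String) :
    goB t xs = (firstOcc xs []).filter (fun y => decide ((List.count y xs : Int) > t)) := by
  fun_induction goB t xs with
  | case1 => simp [firstOcc]
  | case2 w ws a ih =>
    set rest := ws.filter (fun x => decide (¬ x = w)) with hrest
    have ha : a = rest := by
      have h := filter_subtype_unattach (fun y => decide (¬ y = w)) ws.attach
      rw [List.unattach_attach] at h
      exact h
    rw [ha] at ih
    have hq : (fun x => decide (¬ x = w)) = (fun y => !(y == w)) := by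
      funext y; by_cases h : y = w <;> simp [h]
    -- count identity: 1 + ws.length - rest.length = count w (w::ws)
    have hlen : ws.length = List.count w ws + rest.length := by
      have := List.length_eq_countP_add_countP (fun x => x == w) (l := ws)
      have h1 : List.count w ws = List.countP (fun x => x == w) ws := by
        simp [List.count]
      have h2 : rest.length = List.countP (fun x => decide ¬(x == w) = true) ws := by
        rw [hrest, List.countP_eq_length_filter]
        congr 1
        apply List.filter_congr; intro y _; by_cases h : y = w <;> simp [h]
      omega
    have hcnt : (1 + (ws.length : Int) - rest.length) = (List.count w (w :: ws) : Int) := by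
      rw [List.count_cons_self]; push_cast [hlen]; ring
    have hfo : firstOcc (w :: ws) [] = w :: firstOcc rest [] := by
      show (if ([] : List String).contains w then _ else _) = _
      simp only [List.contains_nil, Bool.false_eq_true, if_false]
      rw [firstOcc_cons_seen, hrest, firstOcc_filter, hq]
    rw [hfo]
    simp only [List.filter_cons, hcnt]
    have hrestcount : ∀ y ∈ firstOcc rest [], List.count y (w :: ws) = List.count y rest := by
      intro y hy
      have hymem : y ∈ rest := mem_firstOcc_mem _ _ _ hy
      have hyw : y ≠ w := by
        have := List.of_mem_filter hymem
        simpa using this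
      rw [List.count_cons_of_ne (fun h => hyw h.symm), hrest,
        List.count_filter (by simpa using hyw)]
    by_cases hgt : (List.count w (w :: ws) : Int) > t
    · simp only [hgt, decide_true, if_pos]
      rw [ih]
      simp only [List.cons_append, List.nil_append]
      congr 1
      apply List.filter_congr
      intro y hy
      rw [hrestcount y hy]
    · simp only [hgt, decide_false, Bool.false_eq_true, if_false]
      rw [ih]
      simp only [List.nil_append]
      apply List.filter_congr
      intro y hy
      rw [hrestcount y hy]

theorem calc_known_alt_eq_filter (train_data : List (String × String)) (t : Int) :
    calc_known_alt train_data t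
      = (PySem.Set.ofList (train_data.map Prod.fst)).filter
          (fun k => decide ((List.count k (train_data.map Prod.fst) : Int) > t)) := by
  unfold calc_known_alt
  rw [goB_eq]
  have hnd : ((firstOcc (train_data.map Prod.fst) []).filter
      (fun y => decide ((List.count y (train_data.map Prod.fst) : Int) > t))).Nodup := by
    rw [← ofList_eq_firstOcc]
    exact (PySem.Set.nodup_ofList _).filter _
  rw [ofList_of_nodup _ hnd, ofList_eq_firstOcc]

-- ===== VERDICT (by name: the statement is the Claim_ definition above) =====
theorem calc_known_spec : Claim_equal_calc_known := by
  intro train_data t _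
  unfold Spec_calc_known
  rw [calc_known_eq_filter, calc_known_alt_eq_filter]
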